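-- pv_equiv track=rewrite | github.com/rainervana/adventofcode2023 | day9.py | evaluate
-- ===== SOURCE A (Python) =====
-- def evaluate(numbers):
--     evals = [numbers]
--     repeat = True
--
--     while repeat:
--         temp = []
--         for index in range(len(evals[-1]) - 1):
--             temp.append(evals[-1][index + 1] - evals[-1][index])
--         evals.append(temp)
--
--         if sum(temp) == 0:
--             repeat = False
--
--     return evals
-- ===== SOURCE B (Python) =====
-- def evaluate(numbers):
--     diff = [b - a for a, b in zip(numbers, numbers[1:])]
--     if sum(diff) == 0:
--         return [numbers, diff]
--     return [numbers] + evaluate(diff)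
-- ===== Notes on version B (the rewrite author's own statement) =====
-- stated objective: simpler
-- what changed: Replaced the while-loop that grows an evals list and re-reads evals[-1] with a direct recursion: compute the difference row once via zip and recurse on it, concatenating rows on the way out.
import Mathlib
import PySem

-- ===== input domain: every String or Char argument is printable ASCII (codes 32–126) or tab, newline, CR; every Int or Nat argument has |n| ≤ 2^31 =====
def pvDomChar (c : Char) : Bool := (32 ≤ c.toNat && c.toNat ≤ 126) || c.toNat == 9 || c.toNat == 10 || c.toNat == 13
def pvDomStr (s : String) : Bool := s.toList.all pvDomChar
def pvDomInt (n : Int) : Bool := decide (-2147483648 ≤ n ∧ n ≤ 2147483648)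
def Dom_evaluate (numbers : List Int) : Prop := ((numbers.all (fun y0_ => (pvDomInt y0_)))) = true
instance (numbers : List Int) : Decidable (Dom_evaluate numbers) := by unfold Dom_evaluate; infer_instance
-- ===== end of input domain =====

-- B replaces A's while-loop over a growing evals list with a direct recursion on the difference row (simpler decomposition).


-- ===== PORT A =====
-- temp: the inner for-loop over range(len(last)-1), appending last[index+1]-last[index].
-- Every index accessed is in range, so List.getD (whose default is never hit) is exact here.
def evalTemp (last : List Int) : List Int :=
  (List.range (last.length - 1)).foldl (fun t index => t ++ [last.getD (index + 1) 0 - last.getD index 0]) []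

-- cited by evalLoop's decreasing_by, so it stays above the port
theorem evalTemp_len (last : List Int) : (evalTemp last).length = last.length - 1 := by
  rw [evalTemp, PySem.List.foldl_append_singleton_eq_map]; simp

-- A's while-loop: evals = the accumulated rows, last = evals[-1];
-- 'evalTemp last' is Python's temp (written out at each occurrence; Python computes it once per iteration)
def evalLoop (evals : List (List Int)) (last : List Int) : List (List Int) :=
  if (evalTemp last).sum = 0 then evals ++ [evalTemp last]
  else evalLoop (evals ++ [evalTemp last]) (evalTemp last)
termination_by last.length
decreasing_by
  rename_i h
  have hne : evalTemp last ≠ [] := fun h' => h (by rw [h']; rfl)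
  have h1 := evalTemp_len last
  have h2 := List.length_pos_iff.mpr hne
  omega

def evaluate (numbers : List Int) : List (List Int) := evalLoop [numbers] numbers

-- ===== PORT B =====
-- 'List.zipWith (fun a b => b - a) numbers (numbers.drop 1)' is B's diff
-- (written out at each occurrence; Python B binds it once per call)
def evaluate_alt (numbers : List Int) : List (List Int) :=
  if (List.zipWith (fun a b => b - a) numbers (numbers.drop 1)).sum = 0 then
    [numbers, List.zipWith (fun a b => b - a) numbers (numbers.drop 1)]
  else numbers :: evaluate_alt (List.zipWith (fun a b => b - a) numbers (numbers.drop 1))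
termination_by numbers.length
decreasing_by
  rename_i h
  have hne : List.zipWith (fun a b => b - a) numbers (numbers.drop 1) ≠ [] :=
    fun h' => h (by rw [h']; rfl)
  have h1 : (List.zipWith (fun a b => b - a) numbers (numbers.drop 1)).length
      = min numbers.length (numbers.length - 1) := by simp
  have h2 := List.length_pos_iff.mpr hne
  omega

-- ===== PRECONDITION & SPEC =====
def Spec_evaluate (numbers : List Int) (out : List (List Int)) : Prop := out = evaluate_alt numbers
instance (numbers : List Int) (out : List (List Int)) : Decidable (Spec_evaluate numbers out) := by unfold Spec_evaluate; infer_instance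

-- ===== CLAIM (what is proved, stated in full; the proofs are below) =====
def Claim_equal_evaluate : Prop := ∀ (numbers : List Int), Dom_evaluate numbers → Spec_evaluate numbers (evaluate numbers)

-- ===== LEMMAS AND PROOFS =====

-- A's index-built difference row equals B's zip-built one.
theorem evalTemp_eq (last : List Int) :
    evalTemp last = List.zipWith (fun a b => b - a) last (last.drop 1) := by
  rw [evalTemp, PySem.List.foldl_append_singleton_eq_map]
  apply List.ext_getElem
  · simp
  · intro i h1 h2
    simp only [List.nil_append, List.getElem_map, List.getElem_range, List.getElem_zipWith,
      List.getElem_drop]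
    have hi : i < last.length - 1 := by simpa using h1
    have e1 : last[i]? = some last[i] := List.getElem?_eq_getElem (by omega)
    have e2 : last[i+1]? = some last[i+1] := List.getElem?_eq_getElem (by omega)
    simp [e1, e2, Nat.add_comm]

-- evaluate_alt always starts with its argument row
theorem evaluate_alt_head (numbers : List Int) :
    evaluate_alt numbers = numbers :: (evaluate_alt numbers).tail := by
  rw [evaluate_alt]; split <;> simp

theorem evaluate_alt_tail_zero (numbers : List Int)
    (h : (List.zipWith (fun a b => b - a) numbers (numbers.drop 1)).sum = 0) :
    (evaluate_alt numbers).tail = [List.zipWith (fun a b => b - a) numbers (numbers.drop 1)] := by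
  rw [evaluate_alt, if_pos h]; rfl

theorem evaluate_alt_tail_ne (numbers : List Int)
    (h : ¬ (List.zipWith (fun a b => b - a) numbers (numbers.drop 1)).sum = 0) :
    (evaluate_alt numbers).tail = evaluate_alt (List.zipWith (fun a b => b - a) numbers (numbers.drop 1)) := by
  rw [evaluate_alt, if_neg h]; rfl

-- loop invariant: the rows A's loop appends after evals are exactly B's rows after the head
theorem evalLoop_eq (evals : List (List Int)) (last : List Int) :
    evalLoop evals last = evals ++ (evaluate_alt last).tail := by
  fun_induction evalLoop evals last with
  | case1 evals last h =>
    rw [evalTemp_eq] at h ⊢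
    rw [evaluate_alt_tail_zero last h]
  | case2 evals last h ih =>
    rw [evalTemp_eq] at h ih ⊢
    rw [ih, evaluate_alt_tail_ne last h, List.append_assoc]
    congr 1
    exact (evaluate_alt_head _).symm

-- ===== VERDICT (by name: the statement is the Claim_ definition above) =====
theorem evaluate_spec : Claim_equal_evaluate := by
  intro numbers _
  show evaluate numbers = evaluate_alt numbers
  rw [evaluate, evalLoop_eq]
  conv_rhs => rw [evaluate_alt_head numbers]
  simp
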